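-- pv_equiv track=rewrite | github.com/ELouisMarais/gasmeter | software/gasmeter.py | centreString
-- ===== SOURCE A (Python) =====
-- def centreString(s,d):
-- 	if len(s) >= d:
-- 		s = s[0:d]
-- 	else:
-- 		while len(s) < d:
-- 			s = ' ' +s
-- 			if len(s) < d:
-- 				s += ' '
-- 	return(s)
-- ===== SOURCE B (Python) =====
-- def centreString(s, d):
--     pad = d - len(s)
--     if pad <= 0:
--         return s[0:d]
--     left = (pad + 1) // 2
--     right = pad // 2
--     return ' ' * left + s + ' ' * right
-- ===== Notes on version B (the rewrite author's own statement) =====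
-- stated objective: simpler
-- what changed: Replaces the one-character-at-a-time alternating padding loop with a closed-form computation: left padding is ceil(pad/2), right padding is floor(pad/2), built with string repetition.
import Mathlib
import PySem

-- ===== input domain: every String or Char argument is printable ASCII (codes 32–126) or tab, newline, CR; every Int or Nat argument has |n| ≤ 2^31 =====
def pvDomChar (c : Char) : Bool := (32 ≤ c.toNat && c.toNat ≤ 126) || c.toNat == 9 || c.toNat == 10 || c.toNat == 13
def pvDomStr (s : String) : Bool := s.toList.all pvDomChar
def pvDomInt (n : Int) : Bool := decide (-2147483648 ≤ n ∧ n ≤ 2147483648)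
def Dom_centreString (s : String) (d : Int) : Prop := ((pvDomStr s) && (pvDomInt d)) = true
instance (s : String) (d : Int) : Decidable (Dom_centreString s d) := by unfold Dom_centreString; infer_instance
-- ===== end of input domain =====

-- B replaces A's alternating one-char-at-a-time padding loop by a closed-form
-- split of the padding (left = ceil, right = floor); objective: simpler.

-- ===== PORT A =====
-- the while-loop of A: while len(s) < d: s = ' '+s; if len(s) < d: s += ' '
def pvALoop (d : Int) (l : List Char) : List Char :=
  if _h : (l.length : Int) < d then
    pvALoop d (if (((' ' :: l).length : Int) < d) then (' ' :: l) ++ [' '] else ' ' :: l)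
  else l
termination_by (d - l.length).toNat
decreasing_by
  split <;> simp only [List.length_append, List.length_cons, List.length_nil] <;> omega

def centreString (s : String) (d : Int) : String :=
  if PySem.Str.len s ≥ d then PySem.Str.slice s (some 0) (some d)
  else String.ofList (pvALoop d s.toList)

-- ===== PORT B =====
def centreString_alt (s : String) (d : Int) : String :=
  let pad := d - PySem.Str.len s
  if pad ≤ 0 then PySem.Str.slice s (some 0) (some d)
  else
    String.ofList (PySem.List.pyRepeat [' '] (PySem.Int.floordiv (pad + 1) 2)
               ++ s.toList
               ++ PySem.List.pyRepeat [' '] (PySem.Int.floordiv pad 2))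

-- ===== PRECONDITION & SPEC =====
def Spec_centreString (s : String) (d : Int) (out : String) : Prop := out = centreString_alt s d
instance (s : String) (d : Int) (out : String) : Decidable (Spec_centreString s d out) := by unfold Spec_centreString; infer_instance

-- ===== CLAIM (what is proved, stated in full; the proofs are below) =====
def Claim_equal_centreString : Prop := ∀ (s : String) (d : Int), Dom_centreString s d → Spec_centreString s d (centreString s d)

-- ===== LEMMAS AND PROOFS =====

-- A's loop with pad = d - len(l) produces ceil(pad/2) leading and floor(pad/2) trailing blanks
lemma pvALoop_closed (n : Nat) : ∀ (l : List Char) (d : Int), d - l.length = n →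
    pvALoop d l = List.replicate ((n + 1) / 2) ' ' ++ l ++ List.replicate (n / 2) ' ' := by
  induction n using Nat.strong_induction_on with
  | _ n ih =>
    intro l d hn
    match n, hn with
    | 0, hn =>
      rw [pvALoop, dif_neg (by omega)]; simp
    | 1, hn =>
      rw [pvALoop, dif_pos (by omega),
        if_neg (show ¬(((' ' :: l).length : Int) < d) by simp; omega),
        pvALoop, dif_neg (show ¬(((' ' :: l).length : Int) < d) by simp; omega)]
      simp [List.replicate]
    | (m + 2), hn =>
      rw [pvALoop, dif_pos (by omega),
        if_pos (show (((' ' :: l).length : Int) < d) by simp; omega),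
        ih m (by omega) ((' ' :: l) ++ [' ']) d (by simp; omega)]
      have h1 : (m + 2 + 1) / 2 = (m + 1) / 2 + 1 := by omega
      have h2 : (m + 2) / 2 = m / 2 + 1 := by omega
      have key : ∀ (t : List Char) (kk : Nat),
          List.replicate kk ' ' ++ ' ' :: t = ' ' :: (List.replicate kk ' ' ++ t) := by
        intro t kk
        calc List.replicate kk ' ' ++ ' ' :: t
            = (List.replicate kk ' ' ++ [' ']) ++ t := by simp
          _ = List.replicate (kk + 1) ' ' ++ t := by rw [← List.replicate_succ']
          _ = ' ' :: (List.replicate kk ' ' ++ t) := by rw [List.replicate_succ, List.cons_append]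
      rw [h1, h2, List.replicate_succ, List.replicate_succ', List.cons_append, key, key]
      simp

theorem centreString_spec : Claim_equal_centreString := by
  unfold Claim_equal_centreString Spec_centreString
  intro s d _
  unfold centreString centreString_alt
  simp only [PySem.Str.len_eq]
  by_cases h : (d : Int) - s.toList.length ≤ 0
  · rw [if_pos (by omega), if_pos h]
  · rw [if_neg (by omega), if_neg h]
    set pad : Int := d - s.toList.length with hpad
    have hpos : 0 < pad := by omega
    rw [pvALoop_closed pad.toNat s.toList d (by omega)]
    have e1 : PySem.Int.floordiv (pad + 1) 2 = ((pad.toNat + 1) / 2 : Nat) := by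
      rw [PySem.Int.floordiv_eq_ediv_of_pos (by omega)]; omega
    have e2 : PySem.Int.floordiv pad 2 = ((pad.toNat) / 2 : Nat) := by
      rw [PySem.Int.floordiv_eq_ediv_of_pos (by omega)]; omega
    rw [PySem.List.pyRepeat_singleton, PySem.List.pyRepeat_singleton, e1, e2]
    simp only [Int.toNat_natCast, List.append_assoc]
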